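-- pv_equiv track=rewrite | github.com/MontyOharra/eto_js | server/src/features/htc_integration/address_utils.py | generate_keycounts
-- ===== SOURCE A (Python) =====
-- def generate_keycounts(keycheck: str) -> str:
--     """
--     Generate the FavKeyCounts value from a keycheck string.
--
--     Algorithm (replicates VBA logic):
--     1. Count occurrences of each character in keycheck
--     2. Sort alphabetically by character
--     3. Format as: "A,5;B,3;C,1;..." (character,count pairs separated by semicolons)
--
--     Args:
--         keycheck: The keycheck string to analyze
--
--     Returns:
--         Formatted character count string (max 255 chars to fit VARCHAR(255))
--     """
--     if not keycheck:
--         return ''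
--
--     # Count character occurrences
--     char_counts: dict[str, int] = {}
--     for char in keycheck:
--         char_counts[char] = char_counts.get(char, 0) + 1
--
--     # Sort alphabetically by character
--     sorted_chars = sorted(char_counts.keys())
--
--     # Build result string: "A,5;B,3;..."
--     parts = [f"{char},{char_counts[char]}" for char in sorted_chars]
--     result = ';'.join(parts) + ';'
--
--     # Truncate to 255 chars (VARCHAR(255) limit)
--     return result[:255]
-- ===== SOURCE B (Python) =====
-- def generate_keycounts(keycheck: str) -> str:
--     if not keycheck:
--         return ''
--     # Sort the whole string once, then run-length encode the sorted runs.
--     chars = sorted(keycheck)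
--     n = len(chars)
--     parts = []
--     i = 0
--     while i < n:
--         j = i + 1
--         while j < n and chars[j] == chars[i]:
--             j += 1
--         parts.append(f"{chars[i]},{j - i}")
--         i = j
--     return (';'.join(parts) + ';')[:255]
-- ===== Notes on version B (the rewrite author's own statement) =====
-- stated objective: alternative
-- what changed: Replaces the counting dict + sorted(keys) + per-key lookup with a single sort of the whole string followed by a run-length scan over the sorted characters.
import Mathlib
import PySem

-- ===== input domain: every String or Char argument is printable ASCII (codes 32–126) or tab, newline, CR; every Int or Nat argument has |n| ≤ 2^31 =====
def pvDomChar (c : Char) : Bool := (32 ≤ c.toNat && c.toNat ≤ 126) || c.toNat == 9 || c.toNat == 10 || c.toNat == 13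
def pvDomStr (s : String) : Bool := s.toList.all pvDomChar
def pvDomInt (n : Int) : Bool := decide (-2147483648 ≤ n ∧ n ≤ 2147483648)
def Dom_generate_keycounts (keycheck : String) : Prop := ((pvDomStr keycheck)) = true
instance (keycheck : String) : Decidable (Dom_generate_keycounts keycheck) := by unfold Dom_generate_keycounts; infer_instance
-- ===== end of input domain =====

-- B sorts the whole string once and run-length encodes the sorted runs, instead of A's counting dict + sorted keys + per-key lookup.

-- ===== PORT A =====
def generate_keycounts (keycheck : String) : String :=
  if keycheck.toList = [] then "" else
    let char_counts := keycheck.toList.foldl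
      (fun d c => d.insert c (d.getD c 0 + 1)) (PySem.Dict.empty : PySem.Dict Char Int)
    let sorted_chars := PySem.List.sorted char_counts.keys (fun x => x) false
    -- char_counts[char]: each char iterated is a key of char_counts, so the KeyError branch is unreachable; getD is exact here
    let parts := sorted_chars.map (fun c => c :: ',' :: PySem.Int.toChars (char_counts.getD c 0))
    String.ofList (PySem.List.slice (PySem.Chars.join [';'] parts ++ [';']) none (some (255 : Int)))

-- ===== PORT B =====
-- outer while loop of Source B: recursion on the remaining suffix; inner while loop: takeWhile/dropWhile of the current run
def rleParts : List Char → List (List Char)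
  | [] => []
  | c :: rest =>
      (c :: ',' :: PySem.Int.toChars ((rest.takeWhile (· == c)).length + 1)) ::
      rleParts (rest.dropWhile (· == c))
termination_by l => l.length
decreasing_by
  simp only [List.length_cons]
  exact Nat.lt_succ_of_le (List.length_dropWhile_le _ _)

def generate_keycounts_alt (keycheck : String) : String :=
  if keycheck.toList = [] then "" else
    String.ofList (PySem.List.slice
      (PySem.Chars.join [';'] (rleParts (PySem.List.sorted keycheck.toList (fun x => x) false)) ++ [';'])
      none (some (255 : Int)))

-- ===== PRECONDITION & SPEC =====
def Spec_generate_keycounts (keycheck : String) (out : String) : Prop := out = generate_keycounts_alt keycheck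
instance (keycheck : String) (out : String) : Decidable (Spec_generate_keycounts keycheck out) := by unfold Spec_generate_keycounts; infer_instance

-- ===== CLAIM (what is proved, stated in full; the proofs are below) =====
def Claim_equal_generate_keycounts : Prop := ∀ (keycheck : String), Dom_generate_keycounts keycheck → Spec_generate_keycounts keycheck (generate_keycounts keycheck)

-- ===== LEMMAS AND PROOFS =====

theorem ofList_sublist {α : Type} [BEq α] [LawfulBEq α] (l : List α) :
    (PySem.Set.ofList l).Sublist l := by
  induction l with
  | nil => simp [PySem.Set.ofList_nil]
  | cons x xs ih =>
    rw [PySem.Set.ofList_cons]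
    exact List.cons_sublist_cons.mpr (List.Sublist.trans (by exact List.filter_sublist) ih)

theorem discard_not_mem {α : Type} [BEq α] [LawfulBEq α] (s : List α) (x : α) (h : x ∉ s) :
    PySem.Set.discard s x = s := by
  simp only [PySem.Set.discard]
  exact List.filter_eq_self.mpr (fun a ha => by simp; exact fun e => h (e ▸ ha))

theorem ofList_cons_run {α : Type} [BEq α] [LawfulBEq α] (c : α) (run t : List α)
    (h : ∀ x ∈ run, x = c) : PySem.Set.ofList (c :: (run ++ t)) = PySem.Set.ofList (c :: t) := by
  induction run with
  | nil => rfl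
  | cons x r ih =>
    have hx : x = c := h x (by simp)
    subst hx
    have h2 : ∀ y ∈ r, y = x := fun y hy => h y (by simp [hy])
    rw [← ih h2]
    show (r ++ t).foldl PySem.Set.add (PySem.Set.add (PySem.Set.add [] x) x)
       = (r ++ t).foldl PySem.Set.add (PySem.Set.add [] x)
    rw [PySem.Set.add_of_mem]
    simp [PySem.Set.add_of_not_mem]

-- run-length encoding of a sorted list = its ordered distinct elements paired with their counts
theorem rle_eq (l : List Char) (h : l.Pairwise (· ≤ ·)) :
    rleParts l = (PySem.Set.ofList l).map
      (fun c => c :: ',' :: PySem.Int.toChars ((l.count c : Int))) := by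
  match l with
  | [] => simp [rleParts, PySem.Set.ofList_nil]
  | c :: rest =>
    obtain ⟨hc_le, hrest⟩ := List.pairwise_cons.mp h
    set run := rest.takeWhile (· == c) with hrundef
    set t := rest.dropWhile (· == c) with htdef
    have hrt : run ++ t = rest := List.takeWhile_append_dropWhile
    have hrun : ∀ x ∈ run, x = c := by
      intro x hx
      have := List.mem_takeWhile_imp hx
      simpa using this
    have ht_pw : t.Pairwise (· ≤ ·) := hrest.sublist (List.dropWhile_sublist _)
    have hct : c ∉ t := by
      intro hc
      rcases ht : t with _ | ⟨h0, t'⟩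
      · rw [ht] at hc; simp at hc
      · have hnil : rest.dropWhile (· == c) ≠ [] := by rw [← htdef, ht]; simp
        have hh0 : ((rest.dropWhile (· == c)).head hnil == c) = false :=
          List.head_dropWhile_not (· == c) hnil
        have hne : h0 ≠ c := by
          have he : (rest.dropWhile (· == c)).head hnil = h0 := by
            simp [← htdef, ht]
          rw [he] at hh0; simpa using hh0
        have hmem : h0 ∈ rest := (List.dropWhile_sublist _).mem (by rw [← htdef, ht]; simp)
        have hle : c ≤ h0 := hc_le h0 hmem
        rw [ht] at hc
        simp at hc
        rcases hc with hc | hc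
        · exact hne hc.symm
        · have : h0 ≤ c := ((List.pairwise_cons.mp (ht ▸ ht_pw)).1) c hc
          exact hne (le_antisymm this hle)
    have hcountr : rest.count c = run.length := by
      rw [← hrt, List.count_append]
      have h1 : run.count c = run.length := by
        rw [List.count_eq_length]
        intro b hb; exact (hrun b hb).symm
      have h2 : t.count c = 0 := List.count_eq_zero.mpr hct
      omega
    have hofl : PySem.Set.ofList (c :: rest) = c :: PySem.Set.ofList t := by
      rw [← hrt, ofList_cons_run c run t hrun, PySem.Set.ofList_cons,
        discard_not_mem _ _ (by simpa [PySem.Set.mem_ofList] using hct)]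
    have ih := rle_eq t ht_pw
    rw [rleParts, hofl, List.map_cons, ih]
    congr 1
    · have : (c :: rest).count c = run.length + 1 := by simp [hcountr]
      rw [this, ← hrundef]; push_cast; ring_nf
    · apply List.map_congr_left
      intro c' hc'
      have hc't : c' ∈ t := (PySem.Set.mem_ofList _ _).mp hc'
      have hne : c' ≠ c := fun e => hct (e ▸ hc't)
      have : (c :: rest).count c' = t.count c' := by
        rw [List.count_cons, ← hrt, List.count_append]
        have : run.count c' = 0 := List.count_eq_zero.mpr (fun hm => hne (hrun c' hm))
        simp [this, Ne.symm hne]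
      rw [this]
termination_by l.length
decreasing_by
  simp only [List.length_cons]
  exact Nat.lt_succ_of_le (List.length_dropWhile_le _ _)

-- A's sorted key list is the ordered distinct-element list of the sorted string
theorem sorted_keys_eq (cs : List Char) :
    PySem.List.sorted (cs.foldl (fun d c => d.insert c (d.getD c 0 + 1))
        (PySem.Dict.empty : PySem.Dict Char Int)).keys (fun x => x) false
      = PySem.Set.ofList (PySem.List.sorted cs (fun x => x) false) := by
  rw [PySem.Dict.foldl_insert_getD_add_one_eq_counter, PySem.Dict.keys_counter]
  set l := PySem.List.sorted cs (fun x => x) false with hl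
  have hl_pw : l.Pairwise (· ≤ ·) := by
    simpa using PySem.List.sorted_pairwise (xs := cs) (key := fun x => x)
  apply PySem.List.sorted_eq_of_perm_of_pairwise_lt
  · apply (List.perm_ext_iff_of_nodup (PySem.Set.nodup_ofList _) (PySem.Set.nodup_ofList _)).mpr
    intro a
    rw [PySem.Set.mem_ofList, PySem.Set.mem_ofList, hl, PySem.List.mem_sorted]
  · have h1 : (PySem.Set.ofList l).Pairwise (· ≤ ·) := hl_pw.sublist (ofList_sublist l)
    have h2 : (PySem.Set.ofList l).Nodup := PySem.Set.nodup_ofList _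
    exact (h1.and h2).imp (fun h => lt_of_le_of_ne h.1 h.2)

-- ===== VERDICT (by name: the statement is the Claim_ definition above) =====
theorem generate_keycounts_spec : Claim_equal_generate_keycounts := by
  intro keycheck _
  unfold Spec_generate_keycounts generate_keycounts generate_keycounts_alt
  by_cases hcs : keycheck.toList = []
  · simp [hcs]
  · simp only [if_neg hcs]
    set cs := keycheck.toList with hcsdef
    set l := PySem.List.sorted cs (fun x => x) false with hl
    have hl_pw : l.Pairwise (· ≤ ·) := by
      simpa using PySem.List.sorted_pairwise (xs := cs) (key := fun x => x)
    congr 2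
    rw [sorted_keys_eq, rle_eq l hl_pw, ← hl]
    congr 2
    apply List.map_congr_left
    intro c _
    rw [PySem.Dict.foldl_insert_getD_add_one_eq_counter, PySem.Dict.getD_counter]
    rw [show List.count c l = List.count c cs from
      (PySem.List.sorted_perm cs (fun x => x) false).count_eq c]
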